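-- pv_equiv track=rewrite | github.com/Astenik/newprojects2 | remove_douplicates.py | douplicate_indexes
-- ===== SOURCE A (Python) =====
-- def douplicate_indexes(nums):
--      '''this function returns duplicates numbers' indexes'''
--      res =[]
--      for i in range(len(nums)):
--          for j in range(i + 1, len(nums)):
--               if nums[i] == nums[j]:
--                     res.append(j)
--                     break
--      return res
-- ===== SOURCE B (Python) =====
-- def douplicate_indexes(nums):
--     '''this function returns duplicates numbers' indexes'''
--     last = {}
--     nxt = []
--     for i in range(len(nums) - 1, -1, -1):
--         v = nums[i]
--         nxt.append(last.get(v))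
--         last[v] = i
--     nxt.reverse()
--     return [j for j in nxt if j is not None]
-- ===== Notes on version B (the rewrite author's own statement) =====
-- stated objective: faster
-- what changed: Replaces the quadratic forward scan for each index by a single backward pass that keeps a dict mapping each value to the nearest index where it was seen, so the next-occurrence index is a O(1) lookup.
import Mathlib
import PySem

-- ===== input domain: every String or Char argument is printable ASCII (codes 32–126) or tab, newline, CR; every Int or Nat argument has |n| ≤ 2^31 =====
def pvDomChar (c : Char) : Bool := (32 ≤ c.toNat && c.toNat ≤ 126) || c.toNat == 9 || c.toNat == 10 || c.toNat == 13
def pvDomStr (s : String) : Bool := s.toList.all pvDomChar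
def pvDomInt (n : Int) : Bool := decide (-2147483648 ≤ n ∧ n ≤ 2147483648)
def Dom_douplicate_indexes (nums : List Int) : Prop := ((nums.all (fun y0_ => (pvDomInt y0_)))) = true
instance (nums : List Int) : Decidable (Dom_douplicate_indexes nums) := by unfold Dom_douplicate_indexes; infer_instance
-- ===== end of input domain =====

-- B replaces A's quadratic per-index forward scan by one backward pass with a dict
-- mapping each value to the nearest index where it was seen (asymptotically faster).


-- ===== PORT A =====
-- inner loop: 'for j in range(i+1, len(nums)): if nums[i] == nums[j]: res.append(j); break'
-- (all indices come from range(len(nums)), hence in range: pyGetD with default 0 is exact there);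
-- it returns the appended index, if any
def dupInner (nums : List Int) (i : Int) : List Int → Option Int
  | [] => none
  | j :: js =>
      if PySem.List.pyGetD nums i 0 = PySem.List.pyGetD nums j 0 then some j
      else dupInner nums i js

-- 'res.append(j)' when the inner loop found j, else res unchanged
def dupStep (res : List Int) (o : Option Int) : List Int :=
  match o with
  | some j => res ++ [j]
  | none => res

def douplicate_indexes (nums : List Int) : List Int :=
  (PySem.List.pyRange 0 (nums.length : Int) 1).foldl
    (fun res i => dupStep res (dupInner nums i (PySem.List.pyRange (i + 1) (nums.length : Int) 1))) []

-- ===== PORT B =====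
-- the backward loop 'for i in range(len(nums)-1, -1, -1)': the suffix is processed first,
-- then the head value is looked up in 'last' and overwritten with its (smaller) index;
-- the recursion returns (last, nxt) with nxt already in front-to-back order.
def dupBack : List Int → Int → PySem.Dict Int Int × List (Option Int)
  | [], _ => (PySem.Dict.empty, [])
  | v :: rest, i =>
      let p := dupBack rest (i + 1)
      (p.1.insert v i, p.1.get? v :: p.2)

-- '[j for j in nxt if j is not None]'
def douplicate_indexes_alt (nums : List Int) : List Int :=
  ((dupBack nums 0).2).filterMap id

-- ===== PRECONDITION & SPEC =====
def Spec_douplicate_indexes (nums : List Int) (out : List Int) : Prop := out = douplicate_indexes_alt nums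
instance (nums : List Int) (out : List Int) : Decidable (Spec_douplicate_indexes nums out) := by unfold Spec_douplicate_indexes; infer_instance

-- ===== CLAIM (what is proved, stated in full; the proofs are below) =====
def Claim_equal_douplicate_indexes : Prop := ∀ (nums : List Int), Dom_douplicate_indexes nums → Spec_douplicate_indexes nums (douplicate_indexes nums)

-- ===== LEMMAS AND PROOFS =====

theorem dupStep_some (res : List Int) (j : Int) : dupStep res (some j) = res ++ [j] := rfl
theorem dupStep_none (res : List Int) : dupStep res none = res := rfl

-- the dict built by the backward pass over t (first index i) maps v to i + (first index of v in t)
theorem dupBack_get? (t : List Int) (i v : Int) :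
    (dupBack t i).1.get? v = (PySem.List.index? t v).map (fun k : Nat => i + (k : Int)) := by
  induction t generalizing i with
  | nil => simp [dupBack, PySem.List.index?]
  | cons x rest ih =>
      simp only [dupBack]
      rw [PySem.Dict.get?_insert]
      by_cases hv : v = x
      · subst hv
        rw [PySem.List.index?_cons_self]
        simp
      · rw [if_neg hv, ih, PySem.List.index?_cons_of_ne rest (Ne.symm hv)]
        cases PySem.List.index? rest v <;> simp
        ring

-- A's inner loop over range(a, len) finds a + (first index of nums[i] in the suffix nums[a:])
theorem dupInner_eq (nums : List Int) (i : Int) :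
    ∀ (u : List Int) (a : Int), 0 ≤ a → a.toNat ≤ nums.length → nums.drop a.toNat = u →
      dupInner nums i (PySem.List.pyRange a (nums.length : Int) 1)
        = (PySem.List.index? u (PySem.List.pyGetD nums i 0)).map (fun k : Nat => a + (k : Int)) := by
  intro u
  induction u with
  | nil =>
      intro a ha hle hdrop
      have hna : nums.length ≤ a.toNat := List.drop_eq_nil_iff.mp hdrop
      rw [PySem.List.pyRange_one_eq_nil (by omega : (nums.length : Int) ≤ a)]
      simp [dupInner, PySem.List.index?]
  | cons x rest ih =>
      intro a ha hle hdrop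
      have hlt : a.toNat < nums.length := by
        by_contra h
        rw [List.drop_eq_nil_of_le (by omega)] at hdrop
        simp at hdrop
      rw [List.drop_eq_getElem_cons hlt] at hdrop
      injection hdrop with hx hrest0
      have hrest : nums.drop (a + 1).toNat = rest := by
        have h1 : (a + 1).toNat = a.toNat + 1 := by omega
        rw [h1, hrest0]
      have hga : PySem.List.pyGetD nums a 0 = x := by
        rw [PySem.List.pyGetD_eq_getElem nums 0 ha (by omega : a < (nums.length : Int))]
        exact hx
      rw [PySem.List.pyRange_one_cons (by omega : a < (nums.length : Int))]
      by_cases heq : PySem.List.pyGetD nums i 0 = x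
      · rw [heq, PySem.List.index?_cons_self]
        simp [dupInner, hga, heq]
      · have hih := ih (a + 1) (by omega) (by omega) hrest
        rw [PySem.List.index?_cons_of_ne rest (Ne.symm heq)]
        simp only [dupInner, hga, if_neg heq]
        rw [hih]
        cases PySem.List.index? rest (PySem.List.pyGetD nums i 0) <;> simp
        ring

-- 'if found: res.append(j)' accumulated by foldl is a filterMap
theorem foldl_dupStep {α : Type} (f : α → Option Int) :
    ∀ (l : List α) (acc : List Int),
      l.foldl (fun res i => dupStep res (f i)) acc = acc ++ l.filterMap f := by
  intro l
  induction l with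
  | nil => simp
  | cons x xs ih =>
      intro acc
      cases hfx : f x <;> simp [dupStep_some, dupStep_none, hfx, ih, List.append_assoc]

theorem main_eq (nums : List Int) :
    ∀ (t : List Int) (a : Int), 0 ≤ a → a.toNat ≤ nums.length → nums.drop a.toNat = t →
      (PySem.List.pyRange a (nums.length : Int) 1).filterMap
          (fun i => dupInner nums i (PySem.List.pyRange (i + 1) (nums.length : Int) 1))
        = ((dupBack t a).2).filterMap id := by
  intro t
  induction t with
  | nil =>
      intro a ha hle hdrop
      have hna : nums.length ≤ a.toNat := List.drop_eq_nil_iff.mp hdrop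
      rw [PySem.List.pyRange_one_eq_nil (by omega : (nums.length : Int) ≤ a)]
      simp [dupBack]
  | cons x rest ih =>
      intro a ha hle hdrop
      have hlt : a.toNat < nums.length := by
        by_contra h
        rw [List.drop_eq_nil_of_le (by omega)] at hdrop
        simp at hdrop
      rw [List.drop_eq_getElem_cons hlt] at hdrop
      injection hdrop with hx hrest0
      have hrest : nums.drop (a + 1).toNat = rest := by
        have h1 : (a + 1).toNat = a.toNat + 1 := by omega
        rw [h1, hrest0]
      have hga : PySem.List.pyGetD nums a 0 = x := by
        rw [PySem.List.pyGetD_eq_getElem nums 0 ha (by omega : a < (nums.length : Int))]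
        exact hx
      rw [PySem.List.pyRange_one_cons (by omega : a < (nums.length : Int))]
      have hhead : dupInner nums a (PySem.List.pyRange (a + 1) (nums.length : Int) 1)
          = (dupBack rest (a + 1)).1.get? x := by
        rw [dupInner_eq nums a rest (a + 1) (by omega) (by omega) hrest, hga,
            dupBack_get? rest (a + 1) x]
      rw [List.filterMap_cons, hhead]
      have ihr := ih (a + 1) (by omega) (by omega) hrest
      simp only [dupBack]
      cases (dupBack rest (a + 1)).1.get? x <;> simp [ihr]

-- ===== VERDICT (by name: the statement is the Claim_ definition above) =====
theorem douplicate_indexes_spec : Claim_equal_douplicate_indexes := by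
  intro nums _
  unfold Spec_douplicate_indexes douplicate_indexes douplicate_indexes_alt
  rw [foldl_dupStep (fun i => dupInner nums i (PySem.List.pyRange (i + 1) (nums.length : Int) 1)),
      main_eq nums nums 0 le_rfl (by simp) (by simp)]
  simp
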